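-- pv_equiv track=rewrite | github.com/fuh-Q/gdkore | config/utils.py | all_casings
-- ===== SOURCE A (Python) =====
-- def all_casings(input_string: str):
--     if not input_string:
--         yield ""
--     else:
--         first = input_string[:1]
--         if first.lower() == first.upper():
--             for sub_casing in all_casings(input_string[1:]):
--                 yield first + sub_casing
--         else:
--             for sub_casing in all_casings(input_string[1:]):
--                 yield first.lower() + sub_casing
--                 yield first.upper() + sub_casing
-- ===== SOURCE B (Python) =====
-- def all_casings(input_string: str):
--     # Iterative fold over the reversed string (no recursion): results holds
--     # all casings of the suffix processed so far; prepending each char's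
--     # variants (lower before upper) reproduces the first-char-fastest order.
--     results = [""]
--     for c in reversed(input_string):
--         lo, hi = c.lower(), c.upper()
--         if lo == hi:
--             results = [c + s for s in results]
--         else:
--             results = [x + s for s in results for x in (lo, hi)]
--     yield from results
-- ===== Notes on version B (the rewrite author's own statement) =====
-- stated objective: alternative
-- what changed: Replaced the per-call recursive generator with a single iterative fold over the reversed string that maintains the list of suffix casings, prepending each character's lower/upper variants.
import Mathlib
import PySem

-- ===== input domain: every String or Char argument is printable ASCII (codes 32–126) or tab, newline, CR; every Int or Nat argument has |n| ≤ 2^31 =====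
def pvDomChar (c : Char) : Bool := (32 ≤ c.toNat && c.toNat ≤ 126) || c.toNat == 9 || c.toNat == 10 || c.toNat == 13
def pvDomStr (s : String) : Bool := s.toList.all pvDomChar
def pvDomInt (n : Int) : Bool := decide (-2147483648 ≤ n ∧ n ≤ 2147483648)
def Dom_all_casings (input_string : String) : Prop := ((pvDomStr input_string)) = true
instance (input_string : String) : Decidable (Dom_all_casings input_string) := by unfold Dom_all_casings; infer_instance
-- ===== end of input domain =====

-- B replaces A's recursive generator by an iterative fold over the reversed string (alternative decomposition, same cost).

-- ===== PORT A =====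
-- literal port of A's recursion: first = s[:1]; compare first.lower()/first.upper(); recurse on the tail
def all_casings_go : List Char → List (List Char)
  | [] => [[]]
  | c :: rest =>
    let first : List Char := [c]
    if PySem.Chars.lower first = PySem.Chars.upper first then
      (all_casings_go rest).map (fun sub => first ++ sub)
    else
      (all_casings_go rest).flatMap
        (fun sub => [PySem.Chars.lower first ++ sub, PySem.Chars.upper first ++ sub])

def all_casings (input_string : String) : List String :=
  (all_casings_go input_string.toList).map String.ofList

-- ===== PORT B =====
-- one loop step of Source B: prepend the char's variants to every accumulated suffix casing
def all_casings_alt_step (results : List (List Char)) (c : Char) : List (List Char) :=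
  let lo := PySem.Chars.lowerChar c
  let hi := PySem.Chars.upperChar c
  if lo = hi then results.map (fun s => c :: s)
  else results.flatMap (fun s => [lo :: s, hi :: s])

def all_casings_alt (input_string : String) : List String :=
  ((input_string.toList.reverse).foldl all_casings_alt_step [[]]).map String.ofList

-- ===== PRECONDITION & SPEC =====
def Spec_all_casings (input_string : String) (out : List String) : Prop := out = all_casings_alt input_string
instance (input_string : String) (out : List String) : Decidable (Spec_all_casings input_string out) := by unfold Spec_all_casings; infer_instance

-- ===== CLAIM (what is proved, stated in full; the proofs are below) =====
def Claim_equal_all_casings : Prop := ∀ (input_string : String), Dom_all_casings input_string → Spec_all_casings input_string (all_casings input_string)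

-- ===== LEMMAS AND PROOFS =====
theorem all_casings_go_eq_foldl (l : List Char) :
    all_casings_go l = l.reverse.foldl all_casings_alt_step [[]] := by
  induction l with
  | nil => rfl
  | cons c rest ih =>
    simp only [List.reverse_cons, List.foldl_append, List.foldl_cons, List.foldl_nil, ← ih]
    simp [all_casings_go, all_casings_alt_step, PySem.Chars.lower, PySem.Chars.upper]

-- ===== VERDICT (by name: the statement is the Claim_ definition above) =====
theorem all_casings_spec : Claim_equal_all_casings := by
  intro s _
  unfold Spec_all_casings all_casings all_casings_alt
  rw [all_casings_go_eq_foldl]
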